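-- pv_equiv track=rewrite | github.com/fullscreen-triangle/spectacular | d3-precursor/src/extractors/pattern_extractor.py | _normalize_layout
-- ===== SOURCE A (Python) =====
-- def _normalize_layout(layout: str) -> str:
--     """Normalize a layout pattern to a descriptor."""
--     # Extract layout type
--     layout_types = [
--         'tree', 'cluster', 'pack', 'partition', 'treemap',
--         'forceSimulation', 'force', 'pie', 'stack', 'histogram'
--     ]
--
--     layout_type = "unknown"
--     for lt in layout_types:
--         if f"d3.{lt}" in layout:
--             layout_type = lt
--             break
--
--     # Check for configuration operations
--     operations = []
--
--     # Force layout specific operations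
--     if layout_type in ['force', 'forceSimulation']:
--         if '.force(' in layout or any(f".force{force}" in layout for force in ['Center', 'Collide', 'Link', 'ManyBody', 'X', 'Y', 'Radial']):
--             operations.append('force-config')
--         if '.on(' in layout:
--             operations.append('event-handler')
--         if '.alpha(' in layout or '.alphaTarget(' in layout or '.alphaMin(' in layout or '.alphaDecay(' in layout:
--             operations.append('alpha-config')
--
--     # Hierarchy layout operations
--     elif layout_type in ['tree', 'cluster', 'pack', 'partition', 'treemap']:
--         if '.size(' in layout:
--             operations.append('size')
--         if '.nodeSize(' in layout:
--             operations.append('nodeSize')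
--         if '.separation(' in layout:
--             operations.append('separation')
--         if '.padding(' in layout:
--             operations.append('padding')
--
--     # Pie layout operations
--     elif layout_type == 'pie':
--         if '.value(' in layout:
--             operations.append('value')
--         if '.sort(' in layout:
--             operations.append('sort')
--         if '.startAngle(' in layout or '.endAngle(' in layout:
--             operations.append('angle-config')
--
--     # Stack layout operations
--     elif layout_type == 'stack':
--         if '.keys(' in layout:
--             operations.append('keys')
--         if '.value(' in layout:
--             operations.append('value')
--         if '.order(' in layout:
--             operations.append('order')
--         if '.offset(' in layout:
--             operations.append('offset')
--
--     # Create the pattern descriptor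
--     if operations:
--         return f"{layout_type}-layout with {', '.join(operations)}"
--     else:
--         return f"{layout_type}-layout basic"
-- ===== SOURCE B (Python) =====
-- LAYOUT_TYPES = [
--     'tree', 'cluster', 'pack', 'partition', 'treemap',
--     'forceSimulation', 'force', 'pie', 'stack', 'histogram'
-- ]
--
-- # Stage 1 vocabulary: every operation signature any D3 layout can exhibit,
-- # detected independently of the layout type, in one fixed global order.
-- OP_SIGNATURES = [
--     ('force-config', ['.force(', '.forceCenter', '.forceCollide', '.forceLink',
--                       '.forceManyBody', '.forceX', '.forceY', '.forceRadial']),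
--     ('event-handler', ['.on(']),
--     ('alpha-config', ['.alpha(', '.alphaTarget(', '.alphaMin(', '.alphaDecay(']),
--     ('size', ['.size(']),
--     ('nodeSize', ['.nodeSize(']),
--     ('separation', ['.separation(']),
--     ('padding', ['.padding(']),
--     ('keys', ['.keys(']),
--     ('value', ['.value(']),
--     ('sort', ['.sort(']),
--     ('order', ['.order(']),
--     ('offset', ['.offset(']),
--     ('angle-config', ['.startAngle(', '.endAngle(']),
-- ]
--
-- # Stage 2 vocabulary: which of the globally detected operations each layout
-- # type actually reports.
-- VOCABULARY = {
--     'force': {'force-config', 'event-handler', 'alpha-config'},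
--     'forceSimulation': {'force-config', 'event-handler', 'alpha-config'},
--     'tree': {'size', 'nodeSize', 'separation', 'padding'},
--     'cluster': {'size', 'nodeSize', 'separation', 'padding'},
--     'pack': {'size', 'nodeSize', 'separation', 'padding'},
--     'partition': {'size', 'nodeSize', 'separation', 'padding'},
--     'treemap': {'size', 'nodeSize', 'separation', 'padding'},
--     'pie': {'value', 'sort', 'angle-config'},
--     'stack': {'keys', 'value', 'order', 'offset'},
-- }
--
--
-- def _normalize_layout(layout: str) -> str:
--     """Normalize a layout pattern to a descriptor.
--
--     Two staged passes: first detect every operation signature present in the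
--     code regardless of layout type, then restrict the findings to the detected
--     type's vocabulary."""
--     layout_type = 'unknown'
--     for lt in LAYOUT_TYPES:
--         if 'd3.' + lt in layout:
--             layout_type = lt
--             break
--
--     found = [label for label, subs in OP_SIGNATURES
--              if any(s in layout for s in subs)]
--     vocab = VOCABULARY.get(layout_type, set())
--     operations = [label for label in found if label in vocab]
--
--     if operations:
--         return layout_type + '-layout with ' + ', '.join(operations)
--     return layout_type + '-layout basic'
-- ===== Notes on version B (the rewrite author's own statement) =====
-- stated objective: alternative
-- what changed: Inverted the phase order: instead of branching on the layout type and running that branch's hard-coded checks, B first detects every operation signature present in the string against one global ordered signature table (type-independent pass), then intersects the findings with the detected type's vocabulary set; the per-type if/elif branches disappear entirely.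
import Mathlib
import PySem

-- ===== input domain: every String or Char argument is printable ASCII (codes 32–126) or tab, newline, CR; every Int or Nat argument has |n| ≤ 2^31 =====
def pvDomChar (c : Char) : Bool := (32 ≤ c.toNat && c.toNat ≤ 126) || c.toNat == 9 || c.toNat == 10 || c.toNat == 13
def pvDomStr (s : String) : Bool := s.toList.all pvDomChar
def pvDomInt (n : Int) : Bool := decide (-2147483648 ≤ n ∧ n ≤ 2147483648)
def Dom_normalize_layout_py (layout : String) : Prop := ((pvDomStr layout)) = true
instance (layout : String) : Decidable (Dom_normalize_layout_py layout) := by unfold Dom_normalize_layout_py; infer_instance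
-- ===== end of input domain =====

-- B inverts the phase order: it detects every operation signature in the string type-independently
-- against one global table, then restricts the findings to the detected type's vocabulary set;
-- A's per-type if/elif branches disappear. Same values (alternative decomposition, not faster).

-- ===== PORT A =====
-- the 'for lt in layout_types: if f"d3.{lt}" in layout: layout_type = lt; break' loop
def pvDetectA (layout : String) : List String → String
  | [] => "unknown"
  | lt :: rest => if PySem.Str.isIn ("d3." ++ lt) layout then lt else pvDetectA layout rest

def normalize_layout_py (layout : String) : String :=
  let layout_type := pvDetectA layout
    ["tree", "cluster", "pack", "partition", "treemap",
     "forceSimulation", "force", "pie", "stack", "histogram"]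
  let operations : List String := []
  let operations :=
    if ["force", "forceSimulation"].contains layout_type then
      let operations :=
        if PySem.Str.isIn ".force(" layout ||
           (["Center", "Collide", "Link", "ManyBody", "X", "Y", "Radial"].any
             (fun force => PySem.Str.isIn (".force" ++ force) layout)) then
          operations ++ ["force-config"] else operations
      let operations :=
        if PySem.Str.isIn ".on(" layout then operations ++ ["event-handler"] else operations
      let operations :=
        if PySem.Str.isIn ".alpha(" layout || PySem.Str.isIn ".alphaTarget(" layout ||
           PySem.Str.isIn ".alphaMin(" layout || PySem.Str.isIn ".alphaDecay(" layout then
          operations ++ ["alpha-config"] else operations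
      operations
    else if ["tree", "cluster", "pack", "partition", "treemap"].contains layout_type then
      let operations :=
        if PySem.Str.isIn ".size(" layout then operations ++ ["size"] else operations
      let operations :=
        if PySem.Str.isIn ".nodeSize(" layout then operations ++ ["nodeSize"] else operations
      let operations :=
        if PySem.Str.isIn ".separation(" layout then operations ++ ["separation"] else operations
      let operations :=
        if PySem.Str.isIn ".padding(" layout then operations ++ ["padding"] else operations
      operations
    else if layout_type == "pie" then
      let operations :=
        if PySem.Str.isIn ".value(" layout then operations ++ ["value"] else operations
      let operations :=
        if PySem.Str.isIn ".sort(" layout then operations ++ ["sort"] else operations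
      let operations :=
        if PySem.Str.isIn ".startAngle(" layout || PySem.Str.isIn ".endAngle(" layout then
          operations ++ ["angle-config"] else operations
      operations
    else if layout_type == "stack" then
      let operations :=
        if PySem.Str.isIn ".keys(" layout then operations ++ ["keys"] else operations
      let operations :=
        if PySem.Str.isIn ".value(" layout then operations ++ ["value"] else operations
      let operations :=
        if PySem.Str.isIn ".order(" layout then operations ++ ["order"] else operations
      let operations :=
        if PySem.Str.isIn ".offset(" layout then operations ++ ["offset"] else operations
      operations
    else operations
  if operations ≠ [] then
    layout_type ++ "-layout with " ++ PySem.Str.join ", " operations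
  else
    layout_type ++ "-layout basic"

-- ===== PORT B =====
def pvLayoutTypes : List String :=
  ["tree", "cluster", "pack", "partition", "treemap",
   "forceSimulation", "force", "pie", "stack", "histogram"]

-- global, type-independent operation signature table (stage 1)
def pvOpSignatures : List (String × List String) :=
  [("force-config", [".force(", ".forceCenter", ".forceCollide", ".forceLink",
                     ".forceManyBody", ".forceX", ".forceY", ".forceRadial"]),
   ("event-handler", [".on("]),
   ("alpha-config", [".alpha(", ".alphaTarget(", ".alphaMin(", ".alphaDecay("]),
   ("size", [".size("]),
   ("nodeSize", [".nodeSize("]),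
   ("separation", [".separation("]),
   ("padding", [".padding("]),
   ("keys", [".keys("]),
   ("value", [".value("]),
   ("sort", [".sort("]),
   ("order", [".order("]),
   ("offset", [".offset("]),
   ("angle-config", [".startAngle(", ".endAngle("])]

-- which operations each layout type reports (stage 2)
def pvVocabulary : PySem.Dict String (PySem.Set String) :=
  PySem.Dict.ofList
   [("force", PySem.Set.ofList ["force-config", "event-handler", "alpha-config"]),
    ("forceSimulation", PySem.Set.ofList ["force-config", "event-handler", "alpha-config"]),
    ("tree", PySem.Set.ofList ["size", "nodeSize", "separation", "padding"]),
    ("cluster", PySem.Set.ofList ["size", "nodeSize", "separation", "padding"]),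
    ("pack", PySem.Set.ofList ["size", "nodeSize", "separation", "padding"]),
    ("partition", PySem.Set.ofList ["size", "nodeSize", "separation", "padding"]),
    ("treemap", PySem.Set.ofList ["size", "nodeSize", "separation", "padding"]),
    ("pie", PySem.Set.ofList ["value", "sort", "angle-config"]),
    ("stack", PySem.Set.ofList ["keys", "value", "order", "offset"])]

-- Source B's 'for lt in LAYOUT_TYPES: … break' loop
def pvDetectB (layout : String) : List String → String
  | [] => "unknown"
  | lt :: rest => if PySem.Str.isIn ("d3." ++ lt) layout then lt else pvDetectB layout rest

def normalize_layout_py_alt (layout : String) : String :=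
  let layout_type := pvDetectB layout pvLayoutTypes
  let found := (pvOpSignatures.filter
      (fun p => p.2.any (fun s => PySem.Str.isIn s layout))).map Prod.fst
  let vocab := pvVocabulary.getD layout_type PySem.Set.empty
  let operations := found.filter (fun label => PySem.Set.contains vocab label)
  if operations ≠ [] then
    layout_type ++ "-layout with " ++ PySem.Str.join ", " operations
  else
    layout_type ++ "-layout basic"

-- ===== PRECONDITION & SPEC =====
def Spec_normalize_layout_py (layout : String) (out : String) : Prop := out = normalize_layout_py_alt layout
instance (layout : String) (out : String) : Decidable (Spec_normalize_layout_py layout out) := by unfold Spec_normalize_layout_py; infer_instance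

-- ===== CLAIM (what is proved, stated in full; the proofs are below) =====
def Claim_equal_normalize_layout_py : Prop := ∀ (layout : String), Dom_normalize_layout_py layout → Spec_normalize_layout_py layout (normalize_layout_py layout)

-- ===== LEMMAS AND PROOFS =====

lemma pvDetect_same (layout : String) (l : List String) :
    pvDetectA layout l = pvDetectB layout l := by
  induction l with
  | nil => rfl
  | cons a t ih => simp only [pvDetectA, pvDetectB]; split <;> simp_all

lemma pvDetect_mem (layout : String) (l : List String) :
    pvDetectA layout l = "unknown" ∨ pvDetectA layout l ∈ l := by
  induction l with
  | nil => exact Or.inl rfl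
  | cons a t ih =>
    simp only [pvDetectA]
    split
    · exact Or.inr (List.mem_cons_self ..)
    · rcases ih with h | h
      · exact Or.inl h
      · exact Or.inr (List.mem_cons_of_mem _ h)

-- restricting the globally detected labels to a vocabulary = detecting over the
-- vocabulary-restricted rule table
lemma pvStageComm (l : List (String × List String)) (p : String × List String → Bool)
    (q : String → Bool) :
    (((l.filter p).map Prod.fst).filter q)
      = ((l.filter (fun r => q r.1)).filter p).map Prod.fst := by
  induction l with
  | nil => rfl
  | cons a t ih =>
    cases hp : p a <;> cases hv : q a.1 <;>
      simp only [List.filter_cons, List.map_cons, hp, hv, Bool.false_eq_true,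
        if_false, if_true, ih]

lemma case_tree (layout : String) (h : pvDetectA layout
    ["tree", "cluster", "pack", "partition", "treemap",
     "forceSimulation", "force", "pie", "stack", "histogram"] = "tree") :
    normalize_layout_py layout = normalize_layout_py_alt layout := by
  unfold normalize_layout_py normalize_layout_py_alt
  rw [← pvDetect_same layout pvLayoutTypes]
  unfold pvLayoutTypes
  rw [h]
  have h1 : (["force", "forceSimulation"] : List String).contains "tree" = false := by decide
  have h2 : (["tree", "cluster", "pack", "partition", "treemap"] : List String).contains "tree" = true := by decide
  have hv : pvVocabulary.getD "tree" PySem.Set.empty = ["size", "nodeSize", "separation", "padding"] := by decide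
  have h4 : (("tree" : String) == "pie") = false := by decide
  have h5 : (("tree" : String) == "stack") = false := by decide
  have hf : pvOpSignatures.filter
      (fun r => PySem.Set.contains ["size", "nodeSize", "separation", "padding"] r.1) =
      [("size", [".size("]), ("nodeSize", [".nodeSize("]),
       ("separation", [".separation("]), ("padding", [".padding("])] := by decide
  simp only [h1, h2, h4, h5, hv, pvStageComm, hf, List.filter_cons, List.filter_nil,
    List.any_cons, List.any_nil, Bool.or_false, Bool.or_assoc, if_true, Bool.false_eq_true, if_false]
  generalize PySem.Str.isIn ".size(" layout = b1
  generalize PySem.Str.isIn ".nodeSize(" layout = b2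
  generalize PySem.Str.isIn ".separation(" layout = b3
  generalize PySem.Str.isIn ".padding(" layout = b4
  revert b1 b2 b3 b4
  decide

lemma case_cluster (layout : String) (h : pvDetectA layout
    ["tree", "cluster", "pack", "partition", "treemap",
     "forceSimulation", "force", "pie", "stack", "histogram"] = "cluster") :
    normalize_layout_py layout = normalize_layout_py_alt layout := by
  unfold normalize_layout_py normalize_layout_py_alt
  rw [← pvDetect_same layout pvLayoutTypes]
  unfold pvLayoutTypes
  rw [h]
  have h1 : (["force", "forceSimulation"] : List String).contains "cluster" = false := by decide
  have h2 : (["tree", "cluster", "pack", "partition", "treemap"] : List String).contains "cluster" = true := by decide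
  have hv : pvVocabulary.getD "cluster" PySem.Set.empty = ["size", "nodeSize", "separation", "padding"] := by decide
  have h4 : (("cluster" : String) == "pie") = false := by decide
  have h5 : (("cluster" : String) == "stack") = false := by decide
  have hf : pvOpSignatures.filter
      (fun r => PySem.Set.contains ["size", "nodeSize", "separation", "padding"] r.1) =
      [("size", [".size("]), ("nodeSize", [".nodeSize("]),
       ("separation", [".separation("]), ("padding", [".padding("])] := by decide
  simp only [h1, h2, h4, h5, hv, pvStageComm, hf, List.filter_cons, List.filter_nil,
    List.any_cons, List.any_nil, Bool.or_false, Bool.or_assoc, if_true, Bool.false_eq_true, if_false]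
  generalize PySem.Str.isIn ".size(" layout = b1
  generalize PySem.Str.isIn ".nodeSize(" layout = b2
  generalize PySem.Str.isIn ".separation(" layout = b3
  generalize PySem.Str.isIn ".padding(" layout = b4
  revert b1 b2 b3 b4
  decide

lemma case_pack (layout : String) (h : pvDetectA layout
    ["tree", "cluster", "pack", "partition", "treemap",
     "forceSimulation", "force", "pie", "stack", "histogram"] = "pack") :
    normalize_layout_py layout = normalize_layout_py_alt layout := by
  unfold normalize_layout_py normalize_layout_py_alt
  rw [← pvDetect_same layout pvLayoutTypes]
  unfold pvLayoutTypes
  rw [h]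
  have h1 : (["force", "forceSimulation"] : List String).contains "pack" = false := by decide
  have h2 : (["tree", "cluster", "pack", "partition", "treemap"] : List String).contains "pack" = true := by decide
  have hv : pvVocabulary.getD "pack" PySem.Set.empty = ["size", "nodeSize", "separation", "padding"] := by decide
  have h4 : (("pack" : String) == "pie") = false := by decide
  have h5 : (("pack" : String) == "stack") = false := by decide
  have hf : pvOpSignatures.filter
      (fun r => PySem.Set.contains ["size", "nodeSize", "separation", "padding"] r.1) =
      [("size", [".size("]), ("nodeSize", [".nodeSize("]),
       ("separation", [".separation("]), ("padding", [".padding("])] := by decide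
  simp only [h1, h2, h4, h5, hv, pvStageComm, hf, List.filter_cons, List.filter_nil,
    List.any_cons, List.any_nil, Bool.or_false, Bool.or_assoc, if_true, Bool.false_eq_true, if_false]
  generalize PySem.Str.isIn ".size(" layout = b1
  generalize PySem.Str.isIn ".nodeSize(" layout = b2
  generalize PySem.Str.isIn ".separation(" layout = b3
  generalize PySem.Str.isIn ".padding(" layout = b4
  revert b1 b2 b3 b4
  decide

lemma case_partition (layout : String) (h : pvDetectA layout
    ["tree", "cluster", "pack", "partition", "treemap",
     "forceSimulation", "force", "pie", "stack", "histogram"] = "partition") :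
    normalize_layout_py layout = normalize_layout_py_alt layout := by
  unfold normalize_layout_py normalize_layout_py_alt
  rw [← pvDetect_same layout pvLayoutTypes]
  unfold pvLayoutTypes
  rw [h]
  have h1 : (["force", "forceSimulation"] : List String).contains "partition" = false := by decide
  have h2 : (["tree", "cluster", "pack", "partition", "treemap"] : List String).contains "partition" = true := by decide
  have hv : pvVocabulary.getD "partition" PySem.Set.empty = ["size", "nodeSize", "separation", "padding"] := by decide
  have h4 : (("partition" : String) == "pie") = false := by decide
  have h5 : (("partition" : String) == "stack") = false := by decide
  have hf : pvOpSignatures.filter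
      (fun r => PySem.Set.contains ["size", "nodeSize", "separation", "padding"] r.1) =
      [("size", [".size("]), ("nodeSize", [".nodeSize("]),
       ("separation", [".separation("]), ("padding", [".padding("])] := by decide
  simp only [h1, h2, h4, h5, hv, pvStageComm, hf, List.filter_cons, List.filter_nil,
    List.any_cons, List.any_nil, Bool.or_false, Bool.or_assoc, if_true, Bool.false_eq_true, if_false]
  generalize PySem.Str.isIn ".size(" layout = b1
  generalize PySem.Str.isIn ".nodeSize(" layout = b2
  generalize PySem.Str.isIn ".separation(" layout = b3
  generalize PySem.Str.isIn ".padding(" layout = b4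
  revert b1 b2 b3 b4
  decide

lemma case_treemap (layout : String) (h : pvDetectA layout
    ["tree", "cluster", "pack", "partition", "treemap",
     "forceSimulation", "force", "pie", "stack", "histogram"] = "treemap") :
    normalize_layout_py layout = normalize_layout_py_alt layout := by
  unfold normalize_layout_py normalize_layout_py_alt
  rw [← pvDetect_same layout pvLayoutTypes]
  unfold pvLayoutTypes
  rw [h]
  have h1 : (["force", "forceSimulation"] : List String).contains "treemap" = false := by decide
  have h2 : (["tree", "cluster", "pack", "partition", "treemap"] : List String).contains "treemap" = true := by decide
  have hv : pvVocabulary.getD "treemap" PySem.Set.empty = ["size", "nodeSize", "separation", "padding"] := by decide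
  have h4 : (("treemap" : String) == "pie") = false := by decide
  have h5 : (("treemap" : String) == "stack") = false := by decide
  have hf : pvOpSignatures.filter
      (fun r => PySem.Set.contains ["size", "nodeSize", "separation", "padding"] r.1) =
      [("size", [".size("]), ("nodeSize", [".nodeSize("]),
       ("separation", [".separation("]), ("padding", [".padding("])] := by decide
  simp only [h1, h2, h4, h5, hv, pvStageComm, hf, List.filter_cons, List.filter_nil,
    List.any_cons, List.any_nil, Bool.or_false, Bool.or_assoc, if_true, Bool.false_eq_true, if_false]
  generalize PySem.Str.isIn ".size(" layout = b1
  generalize PySem.Str.isIn ".nodeSize(" layout = b2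
  generalize PySem.Str.isIn ".separation(" layout = b3
  generalize PySem.Str.isIn ".padding(" layout = b4
  revert b1 b2 b3 b4
  decide

lemma case_forceSimulation (layout : String) (h : pvDetectA layout
    ["tree", "cluster", "pack", "partition", "treemap",
     "forceSimulation", "force", "pie", "stack", "histogram"] = "forceSimulation") :
    normalize_layout_py layout = normalize_layout_py_alt layout := by
  unfold normalize_layout_py normalize_layout_py_alt
  rw [← pvDetect_same layout pvLayoutTypes]
  unfold pvLayoutTypes
  rw [h]
  have h1 : (["force", "forceSimulation"] : List String).contains "forceSimulation" = true := by decide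
  have hv : pvVocabulary.getD "forceSimulation" PySem.Set.empty = ["force-config", "event-handler", "alpha-config"] := by decide
  have hf : pvOpSignatures.filter
      (fun r => PySem.Set.contains ["force-config", "event-handler", "alpha-config"] r.1) =
      [("force-config", [".force(", ".forceCenter", ".forceCollide", ".forceLink",
                         ".forceManyBody", ".forceX", ".forceY", ".forceRadial"]),
       ("event-handler", [".on("]),
       ("alpha-config", [".alpha(", ".alphaTarget(", ".alphaMin(", ".alphaDecay("])] := by decide
  simp only [h1, hv, pvStageComm, hf, List.filter_cons, List.filter_nil,
    List.any_cons, List.any_nil, Bool.or_false, Bool.or_assoc, if_true, if_false,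
    show (".force" ++ "Center" : String) = ".forceCenter" from rfl,
    show (".force" ++ "Collide" : String) = ".forceCollide" from rfl,
    show (".force" ++ "Link" : String) = ".forceLink" from rfl,
    show (".force" ++ "ManyBody" : String) = ".forceManyBody" from rfl,
    show (".force" ++ "X" : String) = ".forceX" from rfl,
    show (".force" ++ "Y" : String) = ".forceY" from rfl,
    show (".force" ++ "Radial" : String) = ".forceRadial" from rfl]
  generalize PySem.Str.isIn ".force(" layout = a1
  generalize PySem.Str.isIn ".forceCenter" layout = a2
  generalize PySem.Str.isIn ".forceCollide" layout = a3
  generalize PySem.Str.isIn ".forceLink" layout = a4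
  generalize PySem.Str.isIn ".forceManyBody" layout = a5
  generalize PySem.Str.isIn ".forceX" layout = a6
  generalize PySem.Str.isIn ".forceY" layout = a7
  generalize PySem.Str.isIn ".forceRadial" layout = a8
  generalize PySem.Str.isIn ".on(" layout = b1
  generalize PySem.Str.isIn ".alpha(" layout = c1
  generalize PySem.Str.isIn ".alphaTarget(" layout = c2
  generalize PySem.Str.isIn ".alphaMin(" layout = c3
  generalize PySem.Str.isIn ".alphaDecay(" layout = c4
  generalize (a1 || (a2 || (a3 || (a4 || (a5 || (a6 || (a7 || a8))))))) = d1
  generalize (c1 || (c2 || (c3 || c4))) = d2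
  revert d1 b1 d2
  decide

lemma case_force (layout : String) (h : pvDetectA layout
    ["tree", "cluster", "pack", "partition", "treemap",
     "forceSimulation", "force", "pie", "stack", "histogram"] = "force") :
    normalize_layout_py layout = normalize_layout_py_alt layout := by
  unfold normalize_layout_py normalize_layout_py_alt
  rw [← pvDetect_same layout pvLayoutTypes]
  unfold pvLayoutTypes
  rw [h]
  have h1 : (["force", "forceSimulation"] : List String).contains "force" = true := by decide
  have hv : pvVocabulary.getD "force" PySem.Set.empty = ["force-config", "event-handler", "alpha-config"] := by decide
  have hf : pvOpSignatures.filter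
      (fun r => PySem.Set.contains ["force-config", "event-handler", "alpha-config"] r.1) =
      [("force-config", [".force(", ".forceCenter", ".forceCollide", ".forceLink",
                         ".forceManyBody", ".forceX", ".forceY", ".forceRadial"]),
       ("event-handler", [".on("]),
       ("alpha-config", [".alpha(", ".alphaTarget(", ".alphaMin(", ".alphaDecay("])] := by decide
  simp only [h1, hv, pvStageComm, hf, List.filter_cons, List.filter_nil,
    List.any_cons, List.any_nil, Bool.or_false, Bool.or_assoc, if_true, if_false,
    show (".force" ++ "Center" : String) = ".forceCenter" from rfl,
    show (".force" ++ "Collide" : String) = ".forceCollide" from rfl,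
    show (".force" ++ "Link" : String) = ".forceLink" from rfl,
    show (".force" ++ "ManyBody" : String) = ".forceManyBody" from rfl,
    show (".force" ++ "X" : String) = ".forceX" from rfl,
    show (".force" ++ "Y" : String) = ".forceY" from rfl,
    show (".force" ++ "Radial" : String) = ".forceRadial" from rfl]
  generalize PySem.Str.isIn ".force(" layout = a1
  generalize PySem.Str.isIn ".forceCenter" layout = a2
  generalize PySem.Str.isIn ".forceCollide" layout = a3
  generalize PySem.Str.isIn ".forceLink" layout = a4
  generalize PySem.Str.isIn ".forceManyBody" layout = a5
  generalize PySem.Str.isIn ".forceX" layout = a6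
  generalize PySem.Str.isIn ".forceY" layout = a7
  generalize PySem.Str.isIn ".forceRadial" layout = a8
  generalize PySem.Str.isIn ".on(" layout = b1
  generalize PySem.Str.isIn ".alpha(" layout = c1
  generalize PySem.Str.isIn ".alphaTarget(" layout = c2
  generalize PySem.Str.isIn ".alphaMin(" layout = c3
  generalize PySem.Str.isIn ".alphaDecay(" layout = c4
  generalize (a1 || (a2 || (a3 || (a4 || (a5 || (a6 || (a7 || a8))))))) = d1
  generalize (c1 || (c2 || (c3 || c4))) = d2
  revert d1 b1 d2
  decide

lemma case_pie (layout : String) (h : pvDetectA layout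
    ["tree", "cluster", "pack", "partition", "treemap",
     "forceSimulation", "force", "pie", "stack", "histogram"] = "pie") :
    normalize_layout_py layout = normalize_layout_py_alt layout := by
  unfold normalize_layout_py normalize_layout_py_alt
  rw [← pvDetect_same layout pvLayoutTypes]
  unfold pvLayoutTypes
  rw [h]
  have h1 : (["force", "forceSimulation"] : List String).contains "pie" = false := by decide
  have h2 : (["tree", "cluster", "pack", "partition", "treemap"] : List String).contains "pie" = false := by decide
  have hv : pvVocabulary.getD "pie" PySem.Set.empty = ["value", "sort", "angle-config"] := by decide
  have h4 : (("pie" : String) == "pie") = true := by decide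
  have hf : pvOpSignatures.filter
      (fun r => PySem.Set.contains ["value", "sort", "angle-config"] r.1) =
      [("value", [".value("]), ("sort", [".sort("]),
       ("angle-config", [".startAngle(", ".endAngle("])] := by decide
  simp only [h1, h2, h4, hv, pvStageComm, hf, List.filter_cons, List.filter_nil,
    List.any_cons, List.any_nil, Bool.or_false, Bool.or_assoc, if_true, Bool.false_eq_true, if_false]
  generalize PySem.Str.isIn ".value(" layout = b1
  generalize PySem.Str.isIn ".sort(" layout = b2
  generalize PySem.Str.isIn ".startAngle(" layout = b3
  generalize PySem.Str.isIn ".endAngle(" layout = b4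
  generalize (b3 || b4) = d1
  revert b1 b2 d1
  decide

lemma case_stack (layout : String) (h : pvDetectA layout
    ["tree", "cluster", "pack", "partition", "treemap",
     "forceSimulation", "force", "pie", "stack", "histogram"] = "stack") :
    normalize_layout_py layout = normalize_layout_py_alt layout := by
  unfold normalize_layout_py normalize_layout_py_alt
  rw [← pvDetect_same layout pvLayoutTypes]
  unfold pvLayoutTypes
  rw [h]
  have h1 : (["force", "forceSimulation"] : List String).contains "stack" = false := by decide
  have h2 : (["tree", "cluster", "pack", "partition", "treemap"] : List String).contains "stack" = false := by decide
  have hv : pvVocabulary.getD "stack" PySem.Set.empty = ["keys", "value", "order", "offset"] := by decide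
  have h4 : (("stack" : String) == "pie") = false := by decide
  have h5 : (("stack" : String) == "stack") = true := by decide
  have hf : pvOpSignatures.filter
      (fun r => PySem.Set.contains ["keys", "value", "order", "offset"] r.1) =
      [("keys", [".keys("]), ("value", [".value("]),
       ("order", [".order("]), ("offset", [".offset("])] := by decide
  simp only [h1, h2, h4, h5, hv, pvStageComm, hf, List.filter_cons, List.filter_nil,
    List.any_cons, List.any_nil, Bool.or_false, Bool.or_assoc, if_true, Bool.false_eq_true, if_false]
  generalize PySem.Str.isIn ".keys(" layout = b1
  generalize PySem.Str.isIn ".value(" layout = b2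
  generalize PySem.Str.isIn ".order(" layout = b3
  generalize PySem.Str.isIn ".offset(" layout = b4
  revert b1 b2 b3 b4
  decide

lemma case_histogram (layout : String) (h : pvDetectA layout
    ["tree", "cluster", "pack", "partition", "treemap",
     "forceSimulation", "force", "pie", "stack", "histogram"] = "histogram") :
    normalize_layout_py layout = normalize_layout_py_alt layout := by
  unfold normalize_layout_py normalize_layout_py_alt
  rw [← pvDetect_same layout pvLayoutTypes]
  unfold pvLayoutTypes
  rw [h]
  have h1 : (["force", "forceSimulation"] : List String).contains "histogram" = false := by decide
  have h2 : (["tree", "cluster", "pack", "partition", "treemap"] : List String).contains "histogram" = false := by decide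
  have hv : pvVocabulary.getD "histogram" PySem.Set.empty = [] := by decide
  have h4 : (("histogram" : String) == "pie") = false := by decide
  have h5 : (("histogram" : String) == "stack") = false := by decide
  have hf : pvOpSignatures.filter
      (fun r => PySem.Set.contains [] r.1) = [] := by decide
  simp only [h1, h2, h4, h5, hv, pvStageComm, hf, List.filter_nil, List.map_nil, Bool.false_eq_true, if_false]

lemma case_unknown (layout : String) (h : pvDetectA layout
    ["tree", "cluster", "pack", "partition", "treemap",
     "forceSimulation", "force", "pie", "stack", "histogram"] = "unknown") :
    normalize_layout_py layout = normalize_layout_py_alt layout := by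
  unfold normalize_layout_py normalize_layout_py_alt
  rw [← pvDetect_same layout pvLayoutTypes]
  unfold pvLayoutTypes
  rw [h]
  have h1 : (["force", "forceSimulation"] : List String).contains "unknown" = false := by decide
  have h2 : (["tree", "cluster", "pack", "partition", "treemap"] : List String).contains "unknown" = false := by decide
  have hv : pvVocabulary.getD "unknown" PySem.Set.empty = [] := by decide
  have h4 : (("unknown" : String) == "pie") = false := by decide
  have h5 : (("unknown" : String) == "stack") = false := by decide
  have hf : pvOpSignatures.filter
      (fun r => PySem.Set.contains [] r.1) = [] := by decide
  simp only [h1, h2, h4, h5, hv, pvStageComm, hf, List.filter_nil, List.map_nil, Bool.false_eq_true, if_false]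

-- ===== VERDICT (by name: the statement is the Claim_ definition above) =====
theorem normalize_layout_py_spec : Claim_equal_normalize_layout_py := by
  intro layout _
  unfold Spec_normalize_layout_py
  rcases pvDetect_mem layout pvLayoutTypes with h | h
  · exact case_unknown layout h
  · simp only [pvLayoutTypes, List.mem_cons, List.not_mem_nil, or_false] at h
    rcases h with h|h|h|h|h|h|h|h|h|h
    exacts [case_tree layout h, case_cluster layout h, case_pack layout h,
      case_partition layout h, case_treemap layout h,
      case_forceSimulation layout h, case_force layout h,
      case_pie layout h, case_stack layout h, case_histogram layout h]
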